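-- pv_equiv track=rewrite | github.com/BlueBoi904/leetcode | String/make_fancy_string.py | max_fancy_string
-- ===== SOURCE A (Python) =====
-- def max_fancy_string(s):
--     # start with first letter of s
--     res = s[0]
--
--     # initialize count of consecutive letters to 1
--     curr = 1
--
--     for i in range(1, len(s)):
--         # if current character and previous character are equal then increase count else reset to 1
--         if s[i] == s[i-1]:
--             curr += 1
--         else:
--             curr = 1
--
--         # if count of consecutive characters is less than 3 then add the current character to result string
--         if curr < 3:
--             res += s[i]
--
--     return res
-- ===== SOURCE B (Python) =====
-- def max_fancy_string(s):
--     # Run-length decomposition: cap each maximal run of equal chars at 2 copies.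
--     parts = []
--     rest = s
--     while rest:
--         c = rest[0]
--         k = 1
--         while k < len(rest) and rest[k] == c:
--             k += 1
--         parts.append(c * min(k, 2))
--         rest = rest[k:]
--     return ''.join(parts)
-- ===== Notes on version B (the rewrite author's own statement) =====
-- stated objective: alternative
-- what changed: Replaces A's per-character counter loop with indexed lookback (s[i] vs s[i-1]) by an explicit run-length decomposition that scans each maximal run of equal characters and appends min(run_length, 2) copies of it, joined at the end.
-- outside the precondition, e.g. on max_fancy_string(''): A raises IndexError, B returns ''
-- crash fix: On the empty string A raises IndexError (res = s[0]); B naturally returns the empty string. — e.g. on max_fancy_string(""): A raises IndexError, B returns ""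
import Mathlib
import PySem

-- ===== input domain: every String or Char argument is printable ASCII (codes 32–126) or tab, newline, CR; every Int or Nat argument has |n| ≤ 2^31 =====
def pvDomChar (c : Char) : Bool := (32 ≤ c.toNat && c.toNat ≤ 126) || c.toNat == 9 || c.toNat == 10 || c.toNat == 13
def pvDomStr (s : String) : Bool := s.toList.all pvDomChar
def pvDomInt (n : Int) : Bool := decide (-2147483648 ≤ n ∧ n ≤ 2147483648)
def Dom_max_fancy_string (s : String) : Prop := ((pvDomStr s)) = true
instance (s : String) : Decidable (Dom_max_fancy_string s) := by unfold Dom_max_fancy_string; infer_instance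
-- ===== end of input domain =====

-- B replaces A's per-character counter with a run-length decomposition (cap each run at 2); same cost, different structure.

-- ===== PORT A =====
-- loop body of A's `for i in range(1, len(s))` (state = (res, curr))
def pvABody (cs : List Char) (st : List Char × Int) (i : Int) : List Char × Int :=
  let curr := if PySem.List.pyGetD cs i ' ' == PySem.List.pyGetD cs (i - 1) ' ' then st.2 + 1 else 1
  ((if curr < 3 then st.1 ++ [PySem.List.pyGetD cs i ' '] else st.1), curr)

def pvALoop (cs : List Char) : List Char × Int :=
  (PySem.List.pyRange 1 (cs.length : Int)).foldl (pvABody cs) ([PySem.List.pyGetD cs 0 ' '], 1)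

def max_fancy_string (s : String) : String := String.ofList (pvALoop s.toList).1

-- ===== PORT B =====
-- Source B's outer while: peel one maximal run (inner while = takeWhile count), keep min(k, 2) copies
def pvRuns (cs : List Char) : List Char :=
  match cs with
  | [] => []
  | c :: rest =>
    (c :: (rest.takeWhile (· == c)).take 1) ++ pvRuns (rest.dropWhile (· == c))
termination_by cs.length
decreasing_by
  simp only [List.length_cons]
  exact Nat.lt_succ_of_le (rest.length_dropWhile_le _)

def max_fancy_string_alt (s : String) : String := String.ofList (pvRuns s.toList)

-- ===== PRECONDITION & SPEC =====
-- A evaluates s[0] first, so it raises IndexError exactly on the empty string.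
def Pre_max_fancy_string (s : String) : Prop := s.toList ≠ []
instance (s : String) : Decidable (Pre_max_fancy_string s) := by unfold Pre_max_fancy_string; infer_instance
def pvWitness_max_fancy_string : String := "aaabb"

-- On the empty string A raises IndexError (res = s[0]); B naturally returns the empty string.
def Raises_max_fancy_string (s : String) : Prop := s.toList = []
instance (s : String) : Decidable (Raises_max_fancy_string s) := by unfold Raises_max_fancy_string; infer_instance
def pvRaiseWitness_max_fancy_string : String := ""
def pvRaiseWitnessOut_max_fancy_string : String := ""

def Spec_max_fancy_string (s : String) (out : String) : Prop := out = max_fancy_string_alt s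
instance (s : String) (out : String) : Decidable (Spec_max_fancy_string s out) := by unfold Spec_max_fancy_string; infer_instance

-- ===== CLAIM (what is proved, stated in full; the proofs are below) =====
def Claim_equal_max_fancy_string : Prop := ∀ (s : String), Dom_max_fancy_string s → Pre_max_fancy_string s → Spec_max_fancy_string s (max_fancy_string s)
def Claim_raises_max_fancy_string : Prop := (∀ (s : String), Dom_max_fancy_string s → Raises_max_fancy_string s → ¬ Pre_max_fancy_string s) ∧ (Dom_max_fancy_string (pvRaiseWitness_max_fancy_string) ∧ Raises_max_fancy_string (pvRaiseWitness_max_fancy_string) ∧ max_fancy_string_alt (pvRaiseWitness_max_fancy_string) = pvRaiseWitnessOut_max_fancy_string)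

-- ===== LEMMAS AND PROOFS =====

-- A's loop re-expressed as a structural recursion over the remaining characters
def pvStep (prev : Char) (curr : Int) : List Char → List Char
  | [] => []
  | x :: xs =>
    let c' := if x == prev then curr + 1 else 1
    (if c' < 3 then [x] else []) ++ pvStep x c' xs

lemma pvStep_eq_runs : ∀ (t : List Char) (prev : Char) (curr : Int), 1 ≤ curr →
    pvStep prev curr t
      = (if curr = 1 then (t.takeWhile (· == prev)).take 1 else []) ++ pvRuns (t.dropWhile (· == prev)) := by
  intro t
  induction t with
  | nil => intro prev curr h; simp [pvStep, pvRuns]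
  | cons x xs ih =>
    intro prev curr h
    by_cases hx : x = prev
    · subst hx
      simp only [pvStep, beq_self_eq_true, if_pos, List.takeWhile_cons, List.dropWhile_cons,
        beq_self_eq_true, ite_true]
      rw [ih x (curr + 1) (by omega)]
      by_cases h1 : curr = 1
      · subst h1; norm_num
      · have h2 : ¬ ((curr + 1 : Int) < 3) := by omega
        rw [if_neg h2, if_neg h1, if_neg (show ¬ (curr + 1 = 1) by omega)]
        simp
    · have hbx : (x == prev) = false := by simp [hx]
      simp only [pvStep, hbx, List.takeWhile_cons, List.dropWhile_cons, Bool.false_eq_true,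
        ite_false]
      rw [ih x 1 (by omega)]
      simp [pvRuns, hbx]

lemma pvLoopA (cs : List Char) : ∀ (m k : Nat) (res : List Char) (curr : Int),
    1 ≤ k → cs.length - k = m →
    ((PySem.List.pyRange (k : Int) (cs.length : Int)).foldl (pvABody cs) (res, curr)).1
      = res ++ pvStep (cs.getD (k - 1) ' ') curr (cs.drop k) := by
  intro m
  induction m with
  | zero =>
    intro k res curr hk hm
    have hlen : cs.length ≤ k := by omega
    have hr : PySem.List.pyRange (k : Int) (cs.length : Int) = [] := by
      simp [PySem.List.pyRange]; omega
    rw [hr, List.drop_eq_nil_of_le hlen]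
    simp [pvStep]
  | succ m ih =>
    intro k res curr hk hm
    have hklt : k < cs.length := by omega
    have hcast : ((k : Int)) < (cs.length : Int) := by exact_mod_cast hklt
    rw [PySem.List.pyRange_one_cons hcast, List.foldl_cons]
    have hx : PySem.List.pyGetD cs (k : Int) ' ' = cs[k] := by
      rw [PySem.List.pyGetD_natCast]
      exact List.getD_eq_getElem cs ' ' hklt
    have hprev : PySem.List.pyGetD cs ((k : Int) - 1) ' ' = cs.getD (k - 1) ' ' := by
      have h1 : ((k : Int) - 1) = ((k - 1 : Nat) : Int) := by omega
      rw [h1, PySem.List.pyGetD_natCast]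
    have hone : ((k : Int) + 1) = ((k + 1 : Nat) : Int) := by push_cast; ring
    have hb : pvABody cs (res, curr) (k : Int)
        = (res ++ (if (if cs[k] == cs.getD (k - 1) ' ' then curr + 1 else 1) < 3 then [cs[k]] else []),
           if cs[k] == cs.getD (k - 1) ' ' then curr + 1 else 1) := by
      unfold pvABody
      simp only [hx, hprev]
      split_ifs <;> simp
    rw [hb, hone, ih (k + 1) _ _ (by omega) (by omega)]
    have hgd : cs.getD (k + 1 - 1) ' ' = cs[k] := by
      simp only [Nat.add_sub_cancel]
      exact List.getD_eq_getElem cs ' ' hklt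
    have hdrop : cs.drop k = cs[k] :: cs.drop (k + 1) := List.drop_eq_getElem_cons hklt
    rw [hgd, hdrop]
    simp only [pvStep]
    split_ifs <;> simp

lemma pvMain (cs : List Char) (h : cs ≠ []) : (pvALoop cs).1 = pvRuns cs := by
  obtain ⟨c, t, rfl⟩ := List.exists_cons_of_ne_nil h
  unfold pvALoop
  have hL := pvLoopA (c :: t) ((c :: t).length - 1) 1 [PySem.List.pyGetD (c :: t) 0 ' '] 1
    (by omega) rfl
  simp only [Nat.cast_one] at hL
  rw [hL]
  have h0 : PySem.List.pyGetD (c :: t) 0 ' ' = c := by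
    rw [show (0 : Int) = ((0 : Nat) : Int) from rfl, PySem.List.pyGetD_natCast]; rfl
  rw [h0]
  have hg : (c :: t).getD (1 - 1) ' ' = c := rfl
  have hd : List.drop 1 (c :: t) = t := rfl
  rw [hg, hd, pvStep_eq_runs t c 1 (by omega)]
  simp [pvRuns]

-- ===== VERDICT (by name: the statement is the Claim_ definition above) =====
theorem max_fancy_string_spec : Claim_equal_max_fancy_string := by
  intro s _ hpre
  unfold Spec_max_fancy_string max_fancy_string max_fancy_string_alt
  exact congrArg String.ofList (pvMain s.toList hpre)

@[simp] theorem max_fancy_string_raises : Claim_raises_max_fancy_string := by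
  unfold Claim_raises_max_fancy_string
  refine ⟨fun s _ hr hp => hp hr, ⟨by rfl, by rfl, ?_⟩⟩
  simp [max_fancy_string_alt, pvRaiseWitness_max_fancy_string, pvRaiseWitnessOut_max_fancy_string, pvRuns]
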